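-- pv_equiv track=rewrite | github.com/MShchoholiev-manager/PythonProgramming-KM-42 | practice-11/pr11-task-2.py | rrange
-- ===== SOURCE A (Python) =====
-- def rrange(begin, end, step = 1):
--     if ((begin > end) and (step > 0)) or ((begin < end) and (step < 0)) or (step == 0):
--         return []
--
--     elif begin == end:
--         return []
--
--     else:
--         lst = [begin] + rrange(begin + step, end, step)
--         return lst
-- ===== SOURCE B (Python) =====
-- def rrange(begin, end, step = 1):
--     if step == 0:
--         return []
--     result = []
--     current = begin
--     while (step > 0 and current < end) or (step < 0 and current > end):
--         result.append(current)
--         current += step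
--     return result
-- ===== Notes on version B (the rewrite author's own statement) =====
-- stated objective: faster
-- what changed: Replaced the O(n^2) recursion (rebuilding [begin]+tail at every level, stack overflow near 1000 elements) by one iterative while loop appending into a result list; Pre_ excludes results longer than 990 elements, where A's recursion hits Python's recursion limit (the exact cut-off, about 998, depends on ambient stack depth).
import Mathlib
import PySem

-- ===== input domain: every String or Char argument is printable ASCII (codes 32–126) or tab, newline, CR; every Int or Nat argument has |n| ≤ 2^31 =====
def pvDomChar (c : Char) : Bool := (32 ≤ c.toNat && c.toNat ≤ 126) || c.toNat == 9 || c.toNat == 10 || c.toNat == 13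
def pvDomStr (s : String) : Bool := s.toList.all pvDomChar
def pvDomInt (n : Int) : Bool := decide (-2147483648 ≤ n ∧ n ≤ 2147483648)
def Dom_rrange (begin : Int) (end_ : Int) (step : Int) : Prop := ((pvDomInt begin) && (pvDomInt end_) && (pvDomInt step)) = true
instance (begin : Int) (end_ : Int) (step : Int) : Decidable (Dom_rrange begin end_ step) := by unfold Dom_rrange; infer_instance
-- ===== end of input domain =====

-- B replaces A's quadratic [begin]+recursion list-building by one iterative append loop (faster).


-- ===== PORT A =====
def rrange (begin : Int) (end_ : Int) (step : Int) : List Int :=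
  if (begin > end_ ∧ step > 0) ∨ (begin < end_ ∧ step < 0) ∨ step = 0 then []
  else if begin = end_ then []
  else begin :: rrange (begin + step) end_ step
termination_by (if step > 0 then end_ - begin else begin - end_).toNat
decreasing_by
  simp only [not_or, not_and_or, not_lt] at *
  split_ifs <;> omega

-- ===== PORT B =====
def rrangeLoop (current : Int) (end_ : Int) (step : Int) (result : List Int) : List Int :=
  if (step > 0 ∧ current < end_) ∨ (step < 0 ∧ current > end_) then
    rrangeLoop (current + step) end_ step (result ++ [current])
  else result
termination_by (if step > 0 then end_ - current else current - end_).toNat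
decreasing_by
  split_ifs <;> omega

def rrange_alt (begin : Int) (end_ : Int) (step : Int) : List Int :=
  if step = 0 then []
  else rrangeLoop begin end_ step []

-- ===== PRECONDITION & SPEC =====
-- Pre_ excludes inputs whose resulting list has more than 990 elements: A's recursion hits
-- Python's recursion limit (RecursionError) at about 998 elements, and the exact cut-off
-- depends on the ambient stack depth, so a conservative closed-form bound is used.
def Pre_rrange (begin : Int) (end_ : Int) (step : Int) : Prop :=
  step = 0 ∨ (step > 0 ∧ end_ - begin ≤ 990 * step) ∨ (step < 0 ∧ begin - end_ ≤ 990 * (-step))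
instance (begin : Int) (end_ : Int) (step : Int) : Decidable (Pre_rrange begin end_ step) := by unfold Pre_rrange; infer_instance
def pvWitness_rrange : Int × Int × Int := (0, 10, 2)

def Spec_rrange (begin : Int) (end_ : Int) (step : Int) (out : List Int) : Prop := out = rrange_alt begin end_ step
instance (begin : Int) (end_ : Int) (step : Int) (out : List Int) : Decidable (Spec_rrange begin end_ step out) := by unfold Spec_rrange; infer_instance

-- ===== CLAIM (what is proved, stated in full; the proofs are below) =====
def Claim_equal_rrange : Prop := ∀ (begin : Int) (end_ : Int) (step : Int), Dom_rrange begin end_ step → Pre_rrange begin end_ step → Spec_rrange begin end_ step (rrange begin end_ step)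

-- ===== LEMMAS AND PROOFS =====

theorem rrangeLoop_eq (current end_ step : Int) (result : List Int) :
    rrangeLoop current end_ step result = result ++ rrange current end_ step := by
  fun_induction rrangeLoop current end_ step result with
  | case1 current result h ih =>
    rw [ih]
    rw [show rrange current end_ step = current :: rrange (current + step) end_ step from by
      rw [rrange]; split_ifs with h1 h2 <;> first | rfl | omega]
    simp
  | case2 current result h =>
    rw [show rrange current end_ step = [] from by
      rw [rrange]; simp only [not_or, not_and_or, not_lt] at h; split_ifs with h1 h2 <;> first | rfl | omega]
    simp

-- ===== VERDICT (by name: the statement is the Claim_ definition above) =====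
theorem rrange_spec : Claim_equal_rrange := by
  intro b e s _ _
  unfold Spec_rrange rrange_alt
  split_ifs with h
  · subst h; rw [rrange]; simp
  · rw [rrangeLoop_eq]; simp
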